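-- pv_equiv track=rewrite | github.com/hesam-tavakoli84/just-for-sourcery | bishops.py | placements
-- ===== SOURCE A (Python) =====
-- def squares(i):
--     if (i & 1) == 1:
--         return int(i / 4) * 2 + 1
--     else:
--         return int((i - 1) / 4) * 2 + 2
--
-- def placements(n):
--     if n > 2 * 8 - 1:
--         return 0
--
--     dp = [[0 for i in range(n + 1)]
--           for i in range(8 * 2)]
--
--     for i in range(8 * 2):
--         dp[i][0] = 1
--     dp[1][1] = 1
--
--     for i in range(2, 8 * 2, 1):
--         for j in range(1, n + 1, 1):
--             dp[i][j] = (dp[i - 2][j] + dp[i - 2][j - 1] * (squares(i) - j + 1))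
--
--     ans = 0
--     for i in range(0, n + 1, 1):
--         ans += (dp[8 * 2 - 1][i] * dp[8 * 2 - 2][n - i])
--
--     return ans
-- ===== SOURCE B (Python) =====
-- def placements(n):
--     if n > 15:
--         return 0
--
--     def rook_numbers(sizes):
--         # Goldman-Joichi-White: for a Ferrers board with sorted column sizes b_0<=...<=b_{m-1},
--         #   sum_k r_k * falling(x, m-k) = prod_i (x + b_i - i),
--         # so r_k = (forward difference Delta^{m-k} p)(0) / (m-k)! where p(x) = prod_i (x + b_i - i).
--         m = len(sizes)
--
--         def p(x):
--             v = 1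
--             for i in range(m):
--                 v *= x + sizes[i] - i
--             return v
--
--         vals = [p(x) for x in range(m + 1)]
--         diffs = []
--         for _ in range(m + 1):
--             diffs.append(vals[0])
--             vals = [vals[t + 1] - vals[t] for t in range(len(vals) - 1)]
--
--         def fact(k):
--             f = 1
--             for t in range(2, k + 1):
--                 f *= t
--             return f
--
--         return [diffs[m - k] // fact(m - k) for k in range(m + 1)]
--
--     ra = rook_numbers([1, 1, 3, 3, 5, 5, 7, 7])  # one bishop colour class, as diagonals
--     rb = rook_numbers([2, 2, 4, 4, 6, 6, 8])     # the other colour class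
--     return sum(ra[i] * rb[n - i] for i in range(n + 1)
--                if i < len(ra) and n - i < len(rb))
-- ===== Notes on version B (the rewrite author's own statement) =====
-- stated objective: alternative
-- what changed: Replaces A's 16x(n+1) DP table over interleaved diagonals with the Goldman-Joichi-White rook-polynomial theorem: each colour class's rook numbers are read off the polynomial prod_i(x+b_i-i) via finite differences (r_k = Delta^{m-k}p(0)/(m-k)!), then the two rook-number lists are convolved.
-- outside the precondition, e.g. on placements(0): A raises IndexError, B returns 1; on placements(-2): A raises IndexError, B returns 0
-- crash fix: For n <= 0 A raises IndexError (dp[1][1] assignment on rows of length n+1 <= 1); B returns 1 for n = 0 and 0 for negative n. — e.g. on placements(0): A raises IndexError, B returns 1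
import Mathlib
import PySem

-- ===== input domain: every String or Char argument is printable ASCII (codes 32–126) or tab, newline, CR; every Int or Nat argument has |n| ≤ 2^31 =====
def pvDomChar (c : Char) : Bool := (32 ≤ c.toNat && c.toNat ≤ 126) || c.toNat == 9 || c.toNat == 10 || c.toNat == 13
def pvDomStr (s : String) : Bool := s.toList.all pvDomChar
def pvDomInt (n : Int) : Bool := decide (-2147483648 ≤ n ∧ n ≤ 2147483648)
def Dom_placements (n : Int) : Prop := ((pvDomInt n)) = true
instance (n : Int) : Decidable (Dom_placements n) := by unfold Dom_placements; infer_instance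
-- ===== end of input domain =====

-- B computes each colour class's rook numbers from the Goldman–Joichi–White product polynomial by finite differences instead of A's 16×(n+1) DP table; objective: alternative.


-- ===== PORT A =====
-- int(x/4) on the small nonnegative ints A feeds squares() is exact truncating division = Int.tdiv
def squaresA (i : Int) : Int :=
  if Int.land i 1 == 1 then Int.tdiv i 4 * 2 + 1 else Int.tdiv (i - 1) 4 * 2 + 2

-- 2-D table access; indices are in range on every input admitted by Pre_placements (getD/set exact there)
def dpGet (dp : List (List Int)) (i j : Int) : Int := (dp.getD i.toNat []).getD j.toNat 0
def dpSet (dp : List (List Int)) (i j v : Int) : List (List Int) :=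
  dp.set i.toNat ((dp.getD i.toNat []).set j.toNat v)

def placements (n : Int) : Int :=
  if n > 2 * 8 - 1 then 0
  else
    let dp : List (List Int) :=
      (PySem.List.pyRange 0 16 1).map (fun _ => (PySem.List.pyRange 0 (n + 1) 1).map (fun _ => 0))
    let dp := (PySem.List.pyRange 0 16 1).foldl (fun dp i => dpSet dp i 0 1) dp
    let dp := dpSet dp 1 1 1
    let dp := (PySem.List.pyRange 2 16 1).foldl (fun dp i =>
      (PySem.List.pyRange 1 (n + 1) 1).foldl (fun dp j =>
        dpSet dp i j (dpGet dp (i - 2) j + dpGet dp (i - 2) (j - 1) * (squaresA i - j + 1))) dp) dp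
    (PySem.List.pyRange 0 (n + 1) 1).foldl (fun ans i =>
      ans + dpGet dp 15 i * dpGet dp 14 (n - i)) 0

-- ===== PORT B =====
-- p(x) = prod_i (x + sizes[i] - i): the GJW product polynomial of a Ferrers board
def pEvalB (sizes : List Int) (x : Int) : Int :=
  (PySem.List.pyRange 0 (sizes.length : Int) 1).foldl
    (fun v i => v * (x + sizes.getD i.toNat 0 - i)) 1

-- k! built by the same loop as Source B's fact
def factB (k : Int) : Int :=
  (PySem.List.pyRange 2 (k + 1) 1).foldl (fun f t => f * t) 1

-- one finite-difference pass: vals := [vals[t+1]-vals[t]]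
def diffStepB (vals : List Int) : List Int :=
  (List.range (vals.length - 1)).map (fun t => vals.getD (t + 1) 0 - vals.getD t 0)

-- rook_numbers(sizes): r_k = Delta^{m-k} p(0) / (m-k)!
def rookNumbersB (sizes : List Int) : List Int :=
  let m := sizes.length
  let vals := (PySem.List.pyRange 0 ((m : Int) + 1) 1).map (pEvalB sizes)
  let vd := (List.range (m + 1)).foldl
    (fun (st : List Int × List Int) _ => (diffStepB st.1, st.2 ++ [st.1.getD 0 0]))
    (vals, [])
  (List.range (m + 1)).map (fun k =>
    PySem.Int.floordiv (vd.2.getD (m - k) 0) (factB ((m : Int) - (k : Int))))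

def placements_alt (n : Int) : Int :=
  if n > 15 then 0
  else
    let ra := rookNumbersB [1, 1, 3, 3, 5, 5, 7, 7]
    let rb := rookNumbersB [2, 2, 4, 4, 6, 6, 8]
    (PySem.List.pyRange 0 (n + 1) 1).foldl (fun acc i =>
      if i < (ra.length : Int) ∧ n - i < (rb.length : Int) then
        acc + ra.getD i.toNat 0 * rb.getD (n - i).toNat 0
      else acc) 0

-- ===== PRECONDITION & SPEC =====
-- A raises IndexError for n ≤ 0 (dp[1][1] assignment on rows of length n+1 ≤ 1); it returns exactly for n ≥ 1.
def Pre_placements (n : Int) : Prop := 1 ≤ n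
instance (n : Int) : Decidable (Pre_placements n) := by unfold Pre_placements; infer_instance
def pvWitness_placements : Int := 3

-- On n ≤ 0 A raises IndexError; B returns the natural value there (1 way to place 0 bishops, 0 ways for a negative count).
def Raises_placements (n : Int) : Prop := n ≤ 0
instance (n : Int) : Decidable (Raises_placements n) := by unfold Raises_placements; infer_instance
def pvRaiseWitness_placements : Int := 0
def pvRaiseWitnessOut_placements : Int := 1

def Spec_placements (n : Int) (out : Int) : Prop := out = placements_alt n
instance (n : Int) (out : Int) : Decidable (Spec_placements n out) := by unfold Spec_placements; infer_instance

-- ===== CLAIM =====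
def Claim_equal_placements : Prop := ∀ (n : Int), Dom_placements n → Pre_placements n → Spec_placements n (placements n)
def Claim_raises_placements : Prop := (∀ (n : Int), Dom_placements n → Raises_placements n → ¬ Pre_placements n) ∧ (Dom_placements (pvRaiseWitness_placements) ∧ Raises_placements (pvRaiseWitness_placements) ∧ placements_alt (pvRaiseWitness_placements) = pvRaiseWitnessOut_placements)

-- ===== LEMMAS AND PROOFS =====
theorem placements_eq_big (n : Int) (h : 16 ≤ n) : placements n = placements_alt n := by
  unfold placements placements_alt
  rw [if_pos (by omega), if_pos (by omega)]

-- ===== VERDICT =====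
set_option maxRecDepth 4000 in
theorem placements_spec : Claim_equal_placements := by
  intro n _ hpre
  unfold Spec_placements
  unfold Pre_placements at hpre
  by_cases hb : 16 ≤ n
  · exact placements_eq_big n hb
  · interval_cases n <;> decide

@[simp] theorem placements_raises : Claim_raises_placements := by
  unfold Claim_raises_placements
  exact ⟨by intro n _ h; unfold Raises_placements at h; unfold Pre_placements; omega, by decide⟩
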